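-- pv_equiv track=rewrite | github.com/minavyoussef/jobs-coding-exercises | Intercom-CustomerRecords/main_args.py | boolean_parser
-- ===== SOURCE A (Python) =====
-- def boolean_parser(value):
--     """
--     Parse boolean coommand-line argument
--     """
--     _boolean_mapper = {
--         True: ['true', 't', '1'],
--         False: ['false', 'f', '0']
--     }
--     for key, values in _boolean_mapper.items():
--         if value in values:
--             return key
--     return False
-- ===== SOURCE B (Python) =====
-- def boolean_parser(value):
--     """
--     Parse boolean coommand-line argument
--     """
--     return value in ('true', 't', '1')
-- ===== Notes on version B (the rewrite author's own statement) =====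
-- stated objective: simpler
-- what changed: Drops the bool-to-token-list dict and the key/values loop entirely: since the false tokens and unknown tokens both yield False, B is a single membership test against the three true tokens.
import Mathlib
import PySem

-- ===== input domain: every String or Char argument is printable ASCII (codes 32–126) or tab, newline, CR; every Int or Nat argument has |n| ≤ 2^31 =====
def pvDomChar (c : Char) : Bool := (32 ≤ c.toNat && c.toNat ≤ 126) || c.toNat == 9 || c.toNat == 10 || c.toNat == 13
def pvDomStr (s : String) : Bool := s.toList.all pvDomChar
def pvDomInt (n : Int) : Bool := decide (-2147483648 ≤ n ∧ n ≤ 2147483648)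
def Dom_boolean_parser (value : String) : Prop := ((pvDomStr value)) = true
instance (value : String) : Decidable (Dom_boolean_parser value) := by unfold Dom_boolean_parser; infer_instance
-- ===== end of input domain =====

-- B (simpler): replaces A's bool→token-list dict and items-loop with a single membership test against the three true tokens; false and unknown tokens both yield False either way.


-- ===== PORT A =====
-- loop over the dict's (key, values) items in insertion order; fall through to False
def bpLoop (value : String) : List (Bool × List String) → Bool
  | [] => false
  | (key, values) :: rest => if value ∈ values then key else bpLoop value rest

def boolean_parser (value : String) : Bool :=
  bpLoop value [(true, ["true", "t", "1"]), (false, ["false", "f", "0"])]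

-- ===== PORT B =====
def boolean_parser_alt (value : String) : Bool :=
  value ∈ ["true", "t", "1"]

-- ===== PRECONDITION & SPEC =====
def Spec_boolean_parser (value : String) (out : Bool) : Prop := out = boolean_parser_alt value
instance (value : String) (out : Bool) : Decidable (Spec_boolean_parser value out) := by unfold Spec_boolean_parser; infer_instance

-- ===== CLAIM (what is proved, stated in full; the proofs are below) =====
def Claim_equal_boolean_parser : Prop := ∀ (value : String), Dom_boolean_parser value → Spec_boolean_parser value (boolean_parser value)

-- ===== LEMMAS AND PROOFS =====

-- ===== VERDICT (by name: the statement is the Claim_ definition above) =====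
theorem boolean_parser_spec : Claim_equal_boolean_parser := by
  intro value _
  unfold Spec_boolean_parser boolean_parser boolean_parser_alt bpLoop
  by_cases h1 : value ∈ ["true", "t", "1"]
  · simp [h1]
  · by_cases h2 : value ∈ ["false", "f", "0"]
    · have : value ∉ ["true", "t", "1"] := h1
      simp at h2
      rcases h2 with h | h | h <;> simp [h, bpLoop]
    · simp [bpLoop, h1, h2]
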